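-- pv_equiv track=rewrite | github.com/telatin/seqfu-amplify | amplifu.py | find_amplicons
-- ===== SOURCE A (Python) =====
-- def find_amplicons(primerFor_matchesPlus, primerFor_matchesMinus, primerRev_matchesPlus, primerRev_matchesMinus, min_len, max_len):
--     """
--     Find amplicons from primer matches.
--     Get the start positions of FORWARD primer (in both plus and minus strands) and REVERSE primer (in both plus and minus strands)
--
--     Valid amplicons:
--     1. [FWDPRIM_plus -> REVPRIM_minus]: Forward primer on plus strand to Reverse primer on minus strand
--     2. [REVPRIM_plus -> FWDPRIM_minus]: Reverse primer on plus strand to Forward primer on minus strand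
--
--     Args:
--         primerFor_matchesPlus: List of positions where forward primer matches on plus strand
--         primerFor_matchesMinus: List of positions where forward primer matches on minus strand
--         primerRev_matchesPlus: List of positions where reverse primer matches on plus strand
--         primerRev_matchesMinus: List of positions where reverse primer matches on minus strand
--         min_len: Minimum allowed amplicon length
--         max_len: Maximum allowed amplicon length
--
--     Returns:
--         List of tuples (start, end, first_primer, second_primer)
--     """
--     amplicons = []
--
--     # Case 1: Forward primer (plus strand) to Reverse primer (minus strand)
--     # Direction: 5' -> 3' on plus strand
--     for start in primerFor_matchesPlus:
--         for end in primerRev_matchesMinus: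
--             length = end - start
--             if min_len <= length <= max_len:
--                 amplicons.append((start, end, "forward_plus", "reverse_minus"))
--
--     # Case 2: Reverse primer (plus strand) to Forward primer (minus strand)
--     # Direction: 5' -> 3' on minus strand
--     for start in primerRev_matchesPlus:
--         for end in primerFor_matchesMinus:
--             length = end - start
--             if min_len <= length <= max_len:
--                 amplicons.append((start, end, "reverse_plus", "forward_minus"))
--
--     return sorted(amplicons, key=lambda x: (x[0], x[1]))
-- ===== SOURCE B (Python) =====
-- def _bisect_left(a, x):
--     lo, hi = 0, len(a)
--     while lo < hi:
--         mid = (lo + hi) // 2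
--         if a[mid] < x:
--             lo = mid + 1
--         else:
--             hi = mid
--     return lo
--
--
-- def _bisect_right(a, x):
--     lo, hi = 0, len(a)
--     while lo < hi:
--         mid = (lo + hi) // 2
--         if x < a[mid]:
--             hi = mid
--         else:
--             lo = mid + 1
--     return lo
--
--
-- def find_amplicons(primerFor_matchesPlus, primerFor_matchesMinus, primerRev_matchesPlus, primerRev_matchesMinus, min_len, max_len):
--     # Sort the candidate end positions once, then binary-search the
--     # [start+min_len, start+max_len] window for every start position.
--     ends_rm = sorted(primerRev_matchesMinus)
--     ends_fm = sorted(primerFor_matchesMinus)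
--
--     amplicons = []
--     for start in primerFor_matchesPlus:
--         lo = _bisect_left(ends_rm, start + min_len)
--         hi = _bisect_right(ends_rm, start + max_len)
--         for end in ends_rm[lo:hi]:
--             amplicons.append((start, end, "forward_plus", "reverse_minus"))
--     for start in primerRev_matchesPlus:
--         lo = _bisect_left(ends_fm, start + min_len)
--         hi = _bisect_right(ends_fm, start + max_len)
--         for end in ends_fm[lo:hi]:
--             amplicons.append((start, end, "reverse_plus", "forward_minus"))
--
--     return sorted(amplicons, key=lambda x: (x[0], x[1]))
-- ===== Notes on version B (the rewrite author's own statement) =====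
-- stated objective: faster
-- what changed: Instead of testing every (start, end) pair with nested loops, B sorts each end-position list once and binary-searches the [start+min_len, start+max_len] window for every start, emitting only the hits.
import Mathlib
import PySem

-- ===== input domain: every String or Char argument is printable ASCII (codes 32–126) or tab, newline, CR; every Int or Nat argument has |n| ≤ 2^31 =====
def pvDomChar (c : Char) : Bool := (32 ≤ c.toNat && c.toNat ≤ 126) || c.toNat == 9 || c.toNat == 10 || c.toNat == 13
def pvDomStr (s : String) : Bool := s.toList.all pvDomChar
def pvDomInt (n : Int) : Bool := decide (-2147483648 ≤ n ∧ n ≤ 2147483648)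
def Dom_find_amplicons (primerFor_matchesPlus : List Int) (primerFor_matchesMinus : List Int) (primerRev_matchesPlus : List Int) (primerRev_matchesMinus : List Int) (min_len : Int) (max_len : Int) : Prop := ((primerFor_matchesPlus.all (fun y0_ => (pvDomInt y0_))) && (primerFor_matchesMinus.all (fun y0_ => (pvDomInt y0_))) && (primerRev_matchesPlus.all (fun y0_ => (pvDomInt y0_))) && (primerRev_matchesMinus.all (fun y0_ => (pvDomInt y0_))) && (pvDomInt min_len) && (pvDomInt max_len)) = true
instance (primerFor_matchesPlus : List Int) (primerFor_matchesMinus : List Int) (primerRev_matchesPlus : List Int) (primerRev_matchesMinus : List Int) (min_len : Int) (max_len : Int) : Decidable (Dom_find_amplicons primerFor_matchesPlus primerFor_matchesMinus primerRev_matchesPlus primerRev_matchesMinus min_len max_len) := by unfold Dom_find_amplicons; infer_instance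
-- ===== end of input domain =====

-- B replaces A's all-pairs nested scan by sorting each end list once and binary-searching the
-- [start+min_len, start+max_len] window per start (objective: faster).

-- ===== PORT A =====
def find_amplicons (primerFor_matchesPlus : List Int) (primerFor_matchesMinus : List Int) (primerRev_matchesPlus : List Int) (primerRev_matchesMinus : List Int) (min_len : Int) (max_len : Int) : List (Int × Int × String × String) :=
  let amplicons : List (Int × Int × String × String) := []
  -- Case 1: for start in primerFor_matchesPlus: for end in primerRev_matchesMinus: ...
  let amplicons := primerFor_matchesPlus.foldl (fun acc start =>
    primerRev_matchesMinus.foldl (fun acc end_ =>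
      let length := end_ - start
      if min_len ≤ length ∧ length ≤ max_len then
        acc ++ [(start, end_, "forward_plus", "reverse_minus")]
      else acc) acc) amplicons
  -- Case 2: for start in primerRev_matchesPlus: for end in primerFor_matchesMinus: ...
  let amplicons := primerRev_matchesPlus.foldl (fun acc start =>
    primerFor_matchesMinus.foldl (fun acc end_ =>
      let length := end_ - start
      if min_len ≤ length ∧ length ≤ max_len then
        acc ++ [(start, end_, "reverse_plus", "forward_minus")]
      else acc) acc) amplicons
  PySem.List.sorted2 amplicons (fun x => x.1) (fun x => x.2.1)

-- ===== PORT B =====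
-- _bisect_left(a, x): hand-written binary search of Source B, ported loop for loop
-- (a[mid] is always in range when the loop runs, so getD's default is never read).
def pvBLLoop (a : List Int) (x : Int) (lo hi : Nat) : Nat :=
  if _h : lo < hi then
    let mid := (lo + hi) / 2
    if a.getD mid 0 < x then pvBLLoop a x (mid + 1) hi else pvBLLoop a x lo mid
  else lo
termination_by hi - lo
decreasing_by all_goals omega

def pvBisectLeft (a : List Int) (x : Int) : Nat := pvBLLoop a x 0 a.length

-- _bisect_right(a, x)
def pvBRLoop (a : List Int) (x : Int) (lo hi : Nat) : Nat :=
  if _h : lo < hi then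
    let mid := (lo + hi) / 2
    if x < a.getD mid 0 then pvBRLoop a x lo mid else pvBRLoop a x (mid + 1) hi
  else lo
termination_by hi - lo
decreasing_by all_goals omega

def pvBisectRight (a : List Int) (x : Int) : Nat := pvBRLoop a x 0 a.length

def find_amplicons_alt (primerFor_matchesPlus : List Int) (primerFor_matchesMinus : List Int) (primerRev_matchesPlus : List Int) (primerRev_matchesMinus : List Int) (min_len : Int) (max_len : Int) : List (Int × Int × String × String) :=
  let ends_rm := PySem.List.sorted primerRev_matchesMinus (fun e => e)
  let ends_fm := PySem.List.sorted primerFor_matchesMinus (fun e => e)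
  let amplicons : List (Int × Int × String × String) := []
  let amplicons := primerFor_matchesPlus.foldl (fun acc start =>
    let lo := pvBisectLeft ends_rm (start + min_len)
    let hi := pvBisectRight ends_rm (start + max_len)
    (PySem.List.slice ends_rm (some (lo : Int)) (some (hi : Int))).foldl
      (fun acc end_ => acc ++ [(start, end_, "forward_plus", "reverse_minus")]) acc) amplicons
  let amplicons := primerRev_matchesPlus.foldl (fun acc start =>
    let lo := pvBisectLeft ends_fm (start + min_len)
    let hi := pvBisectRight ends_fm (start + max_len)
    (PySem.List.slice ends_fm (some (lo : Int)) (some (hi : Int))).foldl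
      (fun acc end_ => acc ++ [(start, end_, "reverse_plus", "forward_minus")]) acc) amplicons
  PySem.List.sorted2 amplicons (fun x => x.1) (fun x => x.2.1)

-- ===== PRECONDITION & SPEC =====
def Spec_find_amplicons (primerFor_matchesPlus : List Int) (primerFor_matchesMinus : List Int) (primerRev_matchesPlus : List Int) (primerRev_matchesMinus : List Int) (min_len : Int) (max_len : Int) (out : List (Int × Int × String × String)) : Prop := out = find_amplicons_alt primerFor_matchesPlus primerFor_matchesMinus primerRev_matchesPlus primerRev_matchesMinus min_len max_len
instance (primerFor_matchesPlus : List Int) (primerFor_matchesMinus : List Int) (primerRev_matchesPlus : List Int) (primerRev_matchesMinus : List Int) (min_len : Int) (max_len : Int) (out : List (Int × Int × String × String)) : Decidable (Spec_find_amplicons primerFor_matchesPlus primerFor_matchesMinus primerRev_matchesPlus primerRev_matchesMinus min_len max_len out) := by unfold Spec_find_amplicons; infer_instance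

-- ===== CLAIM (what is proved, stated in full; the proofs are below) =====
def Claim_equal_find_amplicons : Prop := ∀ (primerFor_matchesPlus : List Int) (primerFor_matchesMinus : List Int) (primerRev_matchesPlus : List Int) (primerRev_matchesMinus : List Int) (min_len : Int) (max_len : Int), Dom_find_amplicons primerFor_matchesPlus primerFor_matchesMinus primerRev_matchesPlus primerRev_matchesMinus min_len max_len → Spec_find_amplicons primerFor_matchesPlus primerFor_matchesMinus primerRev_matchesPlus primerRev_matchesMinus min_len max_len (find_amplicons primerFor_matchesPlus primerFor_matchesMinus primerRev_matchesPlus primerRev_matchesMinus min_len max_len)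

-- ===== LEMMAS AND PROOFS =====

-- ---- the sort key (start, end) and Python's lexicographic comparison on it ----
def pvKey (x : Int × Int × String × String) : Int × Int := (x.1, x.2.1)

def pvLt (a b : Int × Int × String × String) : Bool :=
  decide (a.1 < b.1) || (!decide (b.1 < a.1) && decide (a.2.1 < b.2.1))

-- the fiber of the stable sort: elements with a given key, in list order
def pvFib (k : Int × Int) (l : List (Int × Int × String × String)) : List (Int × Int × String × String) :=
  l.filter (fun x => decide (pvKey x = k))

lemma sorted2_eq (xs : List (Int × Int × String × String)) :
    PySem.List.sorted2 xs (fun x => x.1) (fun x => x.2.1) =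
      xs.foldl (fun acc x => PySem.List.insertBy pvLt x acc) [] := rfl

-- arithmetic facts about pvLt
lemma pvLt_asymm {x y : Int × Int × String × String} (h : pvLt x y = true) : pvLt y x = false := by
  simp [pvLt] at *; omega

lemma pvLt_irrefl (x : Int × Int × String × String) : pvLt x x = false := by
  simp [pvLt]

lemma pvLt_trans_false {x y z : Int × Int × String × String}
    (h1 : pvLt x y = true) (h2 : pvLt z y = false) : pvLt z x = false := by
  simp [pvLt] at *; omega

lemma pvLt_key_ne {x y : Int × Int × String × String} (h : pvLt x y = true) : pvKey x ≠ pvKey y := by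
  simp [pvLt, pvKey, Prod.ext_iff] at *; omega

lemma pvLt_antisymm {x y : Int × Int × String × String}
    (h1 : pvLt x y = false) (h2 : pvLt y x = false) : pvKey x = pvKey y := by
  simp [pvLt, pvKey, Prod.ext_iff] at *; omega

-- R: "already in sorted order" relation used by the insertion sort invariant
def pvR (a b : Int × Int × String × String) : Prop := pvLt b a = false

lemma insertBy_cons_pos {x y : Int × Int × String × String} (ys : List (Int × Int × String × String))
    (h : pvLt x y = true) : PySem.List.insertBy pvLt x (y :: ys) = x :: y :: ys := by
  simp [PySem.List.insertBy, h]

lemma insertBy_cons_neg {x y : Int × Int × String × String} (ys : List (Int × Int × String × String))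
    (h : pvLt x y = false) : PySem.List.insertBy pvLt x (y :: ys) = y :: PySem.List.insertBy pvLt x ys := by
  simp [PySem.List.insertBy, h]

lemma insert_pairwise {acc : List (Int × Int × String × String)} (x : Int × Int × String × String)
    (h : acc.Pairwise pvR) : (PySem.List.insertBy pvLt x acc).Pairwise pvR := by
  induction acc with
  | nil => simp [PySem.List.insertBy, pvR]
  | cons y ys ih =>
    rcases List.pairwise_cons.mp h with ⟨hy, hys⟩
    by_cases hxy : pvLt x y = true
    · rw [insertBy_cons_pos ys hxy]
      refine List.pairwise_cons.mpr ⟨?_, h⟩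
      intro z hz
      rcases List.mem_cons.mp hz with rfl | hz
      · exact pvLt_asymm hxy
      · exact pvLt_trans_false hxy (hy z hz)
    · have hxy' : pvLt x y = false := Bool.eq_false_iff.mpr hxy
      rw [insertBy_cons_neg ys hxy']
      refine List.pairwise_cons.mpr ⟨?_, ih hys⟩
      intro z hz
      rcases (PySem.List.mem_insertBy _ _ _ _).mp hz with rfl | hz
      · exact hxy'
      · exact hy z hz

lemma pvLt_key_congr {z x : Int × Int × String × String} (h : pvKey z = pvKey x)
    (y : Int × Int × String × String) : pvLt z y = pvLt x y := by
  simp [pvKey, Prod.ext_iff] at h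
  simp [pvLt, h.1, h.2]

lemma insert_fiber {acc : List (Int × Int × String × String)} (x : Int × Int × String × String)
    (h : acc.Pairwise pvR) (k : Int × Int) :
    pvFib k (PySem.List.insertBy pvLt x acc) =
      pvFib k acc ++ (if pvKey x = k then [x] else []) := by
  induction acc with
  | nil => by_cases hk : pvKey x = k <;> simp [PySem.List.insertBy, pvFib, hk]
  | cons y ys ih =>
    rcases List.pairwise_cons.mp h with ⟨hy, hys⟩
    by_cases hxy : pvLt x y = true
    · rw [insertBy_cons_pos ys hxy]
      by_cases hk : pvKey x = k
      · have hemp : (y :: ys).filter (fun z => decide (pvKey z = k)) = [] := by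
          refine List.filter_eq_nil_iff.mpr ?_
          intro z hz
          simp only [decide_eq_true_eq]
          intro hzk
          have hzx : pvKey z = pvKey x := by rw [hzk, hk]
          rcases List.mem_cons.mp hz with rfl | hz'
          · exact (pvLt_key_ne hxy) hzx.symm
          · have hzy : pvLt z y = false := hy z hz'
            rw [pvLt_key_congr hzx y, hxy] at hzy
            exact Bool.noConfusion hzy
        unfold pvFib
        rw [List.filter_cons]
        simp [hk, hemp]
      · unfold pvFib
        rw [List.filter_cons]
        simp [hk]
    · have hxy' : pvLt x y = false := Bool.eq_false_iff.mpr hxy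
      rw [insertBy_cons_neg ys hxy']
      have hIH := ih hys
      unfold pvFib at hIH ⊢
      rw [List.filter_cons, List.filter_cons, hIH]
      by_cases hyk : pvKey y = k <;> simp [hyk]

lemma foldl_insert_spec (xs : List (Int × Int × String × String)) :
    ∀ acc, acc.Pairwise pvR →
      (xs.foldl (fun acc x => PySem.List.insertBy pvLt x acc) acc).Pairwise pvR ∧
      ∀ k, pvFib k (xs.foldl (fun acc x => PySem.List.insertBy pvLt x acc) acc) =
            pvFib k acc ++ pvFib k xs := by
  induction xs with
  | nil => intro acc h; exact ⟨h, fun k => by simp [pvFib]⟩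
  | cons x xs ih =>
    intro acc h
    have h1 := insert_pairwise x h
    rcases ih (PySem.List.insertBy pvLt x acc) h1 with ⟨hp, hf⟩
    refine ⟨by simpa using hp, fun k => ?_⟩
    have := hf k
    rw [List.foldl_cons, this, insert_fiber x h k]
    by_cases hk : pvKey x = k <;> simp [pvFib, hk]

-- a sorted (Pairwise pvR) list is determined by its fibers
lemma eq_of_fibers {l₁ : List (Int × Int × String × String)} :
    ∀ {l₂ : List (Int × Int × String × String)}, l₁.Pairwise pvR → l₂.Pairwise pvR →
      (∀ k, pvFib k l₁ = pvFib k l₂) → l₁ = l₂ := by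
  induction l₁ with
  | nil =>
    intro l₂ _ _ hf
    cases l₂ with
    | nil => rfl
    | cons b t₂ =>
      have := hf (pvKey b)
      simp [pvFib] at this
  | cons a t₁ ih =>
    intro l₂ h₁ h₂ hf
    cases l₂ with
    | nil =>
      have := hf (pvKey a)
      simp [pvFib] at this
    | cons b t₂ =>
      rcases List.pairwise_cons.mp h₁ with ⟨ha, ht₁⟩
      rcases List.pairwise_cons.mp h₂ with ⟨hb, ht₂⟩
      -- b ∈ a :: t₁ and a ∈ b :: t₂
      have hbmem : b ∈ a :: t₁ := by
        have := hf (pvKey b)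
        have hbfib : b ∈ pvFib (pvKey b) (b :: t₂) := by simp [pvFib]
        have : b ∈ pvFib (pvKey b) (a :: t₁) := this ▸ hbfib
        exact List.mem_of_mem_filter this
      have hamem : a ∈ b :: t₂ := by
        have := (hf (pvKey a)).symm
        have hafib : a ∈ pvFib (pvKey a) (a :: t₁) := by simp [pvFib]
        have : a ∈ pvFib (pvKey a) (b :: t₂) := this ▸ hafib
        exact List.mem_of_mem_filter this
      have hba : pvLt b a = false := by
        rcases List.mem_cons.mp hbmem with rfl | hb' 
        · exact pvLt_irrefl b
        · exact ha b hb'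
      have hab : pvLt a b = false := by
        rcases List.mem_cons.mp hamem with rfl | ha'
        · exact pvLt_irrefl a
        · exact hb a ha'
      have hkey : pvKey a = pvKey b := pvLt_antisymm hab hba
      have hmain := hf (pvKey a)
      rw [show pvFib (pvKey a) (a :: t₁) = a :: pvFib (pvKey a) t₁ by simp [pvFib],
          show pvFib (pvKey a) (b :: t₂) = b :: pvFib (pvKey a) t₂ by simp [pvFib, ← hkey]] at hmain
      have hAB : a = b := (List.cons.injEq _ _ _ _ ▸ hmain).1
      have htfib : ∀ k, pvFib k t₁ = pvFib k t₂ := by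
        intro k
        by_cases hk : k = pvKey a
        · subst hk; exact (List.cons.injEq _ _ _ _ ▸ hmain).2
        · have hka : ¬ pvKey a = k := fun h => hk h.symm
          have hkb : ¬ pvKey b = k := fun h => hk (hkey.trans h).symm
          have := hf k
          unfold pvFib at this
          rw [List.filter_cons, List.filter_cons] at this
          simpa [pvFib, hka, hkb] using this
      rw [hAB, ih ht₁ ht₂ htfib]

-- the stable sort only depends on the fibers
lemma sorted2_congr {X Y : List (Int × Int × String × String)}
    (h : ∀ k, pvFib k X = pvFib k Y) :
    PySem.List.sorted2 X (fun x => x.1) (fun x => x.2.1) =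
      PySem.List.sorted2 Y (fun x => x.1) (fun x => x.2.1) := by
  rw [sorted2_eq, sorted2_eq]
  rcases foldl_insert_spec X [] (by simp) with ⟨hpX, hfX⟩
  rcases foldl_insert_spec Y [] (by simp) with ⟨hpY, hfY⟩
  refine eq_of_fibers hpX hpY ?_
  intro k
  rw [hfX k, hfY k, h k]

-- ---- binary-search specs ----
lemma pvBLLoop_spec (E : List Int) (x : Int) (hs : E.Pairwise (· ≤ ·)) :
    ∀ n lo hi, hi - lo ≤ n → lo ≤ hi → hi ≤ E.length →
      lo ≤ pvBLLoop E x lo hi ∧ pvBLLoop E x lo hi ≤ hi ∧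
      (∀ j (h : j < E.length), lo ≤ j → j < pvBLLoop E x lo hi → E[j] < x) ∧
      (∀ j (h : j < E.length), pvBLLoop E x lo hi ≤ j → j < hi → x ≤ E[j]) := by
  have hmono : ∀ i j (hi : i < E.length) (hj : j < E.length), i ≤ j → E[i] ≤ E[j] := by
    intro i j hi hj hij
    rcases Nat.lt_or_ge i j with h | h
    · exact List.pairwise_iff_getElem.mp hs i j hi hj h
    · have : i = j := by omega
      subst this; rfl
  intro n
  induction n with
  | zero =>
    intro lo hi h1 h2 h3
    have : lo = hi := by omega
    subst this
    rw [pvBLLoop, dif_neg (Nat.lt_irrefl _)]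
    refine ⟨le_rfl, le_rfl, ?_, ?_⟩ <;> intro j hj h1' h2' <;> omega
  | succ n ih =>
    intro lo hi h1 h2 h3
    by_cases hlt : lo < hi
    · have hmid : (lo + hi) / 2 < E.length := by omega
      rw [pvBLLoop]
      simp only [hlt, dif_pos]
      rw [List.getD_eq_getElem E 0 hmid]
      by_cases hc : E[(lo + hi) / 2] < x
      · simp only [hc, if_pos]
        rcases ih ((lo + hi) / 2 + 1) hi (by omega) (by omega) h3 with ⟨g1, g2, g3, g4⟩
        refine ⟨by omega, g2, ?_, g4⟩
        intro j hj hj1 hj2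
        by_cases hjm : (lo + hi) / 2 + 1 ≤ j
        · exact g3 j hj hjm hj2
        · exact lt_of_le_of_lt (hmono j _ hj hmid (by omega)) hc
      · rw [if_neg hc]
        rcases ih lo ((lo + hi) / 2) (by omega) (by omega) (by omega) with ⟨g1, g2, g3, g4⟩
        refine ⟨g1, by omega, g3, ?_⟩
        intro j hj hj1 hj2
        by_cases hjm : j < (lo + hi) / 2
        · exact g4 j hj hj1 hjm
        · have := hmono _ j hmid hj (by omega)
          omega
    · rw [pvBLLoop, dif_neg hlt]
      refine ⟨le_rfl, by omega, ?_, ?_⟩ <;> intro j hj h1' h2' <;> omega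

lemma pvBRLoop_spec (E : List Int) (x : Int) (hs : E.Pairwise (· ≤ ·)) :
    ∀ n lo hi, hi - lo ≤ n → lo ≤ hi → hi ≤ E.length →
      lo ≤ pvBRLoop E x lo hi ∧ pvBRLoop E x lo hi ≤ hi ∧
      (∀ j (h : j < E.length), lo ≤ j → j < pvBRLoop E x lo hi → E[j] ≤ x) ∧
      (∀ j (h : j < E.length), pvBRLoop E x lo hi ≤ j → j < hi → x < E[j]) := by
  have hmono : ∀ i j (hi : i < E.length) (hj : j < E.length), i ≤ j → E[i] ≤ E[j] := by
    intro i j hi hj hij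
    rcases Nat.lt_or_ge i j with h | h
    · exact List.pairwise_iff_getElem.mp hs i j hi hj h
    · have : i = j := by omega
      subst this; rfl
  intro n
  induction n with
  | zero =>
    intro lo hi h1 h2 h3
    have : lo = hi := by omega
    subst this
    rw [pvBRLoop, dif_neg (Nat.lt_irrefl _)]
    refine ⟨le_rfl, le_rfl, ?_, ?_⟩ <;> intro j hj h1' h2' <;> omega
  | succ n ih =>
    intro lo hi h1 h2 h3
    by_cases hlt : lo < hi
    · have hmid : (lo + hi) / 2 < E.length := by omega
      rw [pvBRLoop]
      simp only [hlt, dif_pos]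
      rw [List.getD_eq_getElem E 0 hmid]
      by_cases hc : x < E[(lo + hi) / 2]
      · simp only [hc, if_pos]
        rcases ih lo ((lo + hi) / 2) (by omega) (by omega) (by omega) with ⟨g1, g2, g3, g4⟩
        refine ⟨g1, by omega, g3, ?_⟩
        intro j hj hj1 hj2
        by_cases hjm : j < (lo + hi) / 2
        · exact g4 j hj hj1 hjm
        · exact lt_of_lt_of_le hc (hmono _ j hmid hj (by omega))
      · rw [if_neg hc]
        rcases ih ((lo + hi) / 2 + 1) hi (by omega) (by omega) h3 with ⟨g1, g2, g3, g4⟩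
        refine ⟨by omega, g2, ?_, g4⟩
        intro j hj hj1 hj2
        by_cases hjm : (lo + hi) / 2 + 1 ≤ j
        · exact g3 j hj hjm hj2
        · have := hmono j _ hj hmid (by omega)
          omega
    · rw [pvBRLoop, dif_neg hlt]
      refine ⟨le_rfl, by omega, ?_, ?_⟩ <;> intro j hj h1' h2' <;> omega

-- the slice between the two bisections is exactly the in-window filter
lemma window_eq (E : List Int) (hs : E.Pairwise (· ≤ ·)) (xlo xhi : Int) :
    PySem.List.slice E (some ((pvBisectLeft E xlo : Nat) : Int)) (some ((pvBisectRight E xhi : Nat) : Int)) =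
      E.filter (fun e => decide (xlo ≤ e ∧ e ≤ xhi)) := by
  unfold pvBisectLeft pvBisectRight
  rcases pvBLLoop_spec E xlo hs E.length 0 E.length (by omega) (by omega) le_rfl with ⟨-, hlo2, hlo3, hlo4⟩
  rcases pvBRLoop_spec E xhi hs E.length 0 E.length (by omega) (by omega) le_rfl with ⟨-, hhi2, hhi3, hhi4⟩
  set lo := pvBLLoop E xlo 0 E.length with hlodef
  set hi := pvBRLoop E xhi 0 E.length with hhidef
  rw [PySem.List.slice_natCast]
  by_cases hlohi : lo ≤ hi
  · -- E = take lo ++ (the slice) ++ drop hi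
    have hsplit : E = E.take lo ++ ((E.drop lo).take (hi - lo) ++ E.drop hi) := by
      rw [show E.drop hi = (E.drop lo).drop (hi - lo) by
            rw [List.drop_drop]; congr 1; omega]
      rw [List.take_append_drop, List.take_append_drop]
    conv_rhs => rw [hsplit]
    rw [List.filter_append, List.filter_append]
    have h1 : (E.take lo).filter (fun e => decide (xlo ≤ e ∧ e ≤ xhi)) = [] := by
      refine List.filter_eq_nil_iff.mpr ?_
      intro a ha
      rcases List.mem_iff_getElem.mp ha with ⟨i, hilen, hieq⟩
      have hi1 : i < lo := by
        have := hilen; simp [List.length_take] at this; omega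
      have hilE : i < E.length := by
        have := hilen; simp [List.length_take] at this; omega
      have : (E.take lo)[i] = E[i] := List.getElem_take
      rw [this] at hieq
      have := hlo3 i hilE (by omega) hi1
      simp; omega
    have h3 : (E.drop hi).filter (fun e => decide (xlo ≤ e ∧ e ≤ xhi)) = [] := by
      refine List.filter_eq_nil_iff.mpr ?_
      intro a ha
      rcases List.mem_iff_getElem.mp ha with ⟨i, hilen, hieq⟩
      have hilE : hi + i < E.length := by
        have := hilen; simp [List.length_drop] at this; omega
      have : (E.drop hi)[i] = E[hi + i] := List.getElem_drop ..
      rw [this] at hieq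
      have := hhi4 (hi + i) hilE (by omega) (by omega)
      simp; omega
    have h2 : ((E.drop lo).take (hi - lo)).filter (fun e => decide (xlo ≤ e ∧ e ≤ xhi)) =
        (E.drop lo).take (hi - lo) := by
      refine List.filter_eq_self.mpr ?_
      intro a ha
      rcases List.mem_iff_getElem.mp ha with ⟨i, hilen, hieq⟩
      have hib : i < hi - lo ∧ lo + i < E.length := by
        have := hilen; simp [List.length_take, List.length_drop] at this; omega
      have : ((E.drop lo).take (hi - lo))[i] = E[lo + i] := by
        rw [List.getElem_take, List.getElem_drop]
      rw [this] at hieq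
      have hge := hlo4 (lo + i) hib.2 (by omega) (by omega)
      have hle := hhi3 (lo + i) hib.2 (by omega) (by omega)
      simp; omega
    rw [h1, h2, h3]
    simp
  · -- empty window: lo > hi, the slice is [] and nothing passes the filter
    have htake : (hi - lo : Nat) = 0 := by omega
    rw [htake]
    simp only [List.take_zero]
    symm
    refine List.filter_eq_nil_iff.mpr ?_
    intro a ha
    rcases List.mem_iff_getElem.mp ha with ⟨i, hilen, hieq⟩
    simp only [decide_eq_true_eq, not_and, not_le]
    intro hxlo
    by_contra hxhi
    rw [not_lt] at hxhi
    have hige : ¬ i < lo := by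
      intro hcon
      have := hlo3 i hilen (by omega) hcon
      omega
    have := hhi4 i hilen (by omega) (by omega)
    omega

-- ---- fibers of one start's block ----
lemma block_fiber (E : List Int) (s : Int) (c : String × String) (p : Int → Bool) (k : Int × Int) :
    pvFib k ((E.filter p).map (fun e => (s, e, c.1, c.2))) =
      if s = k.1 ∧ p k.2 = true then List.replicate (E.count k.2) (s, k.2, c.1, c.2) else [] := by
  unfold pvFib
  rw [List.filter_map, List.filter_filter]
  have hfun : (fun a => ((fun x => decide (pvKey x = k)) ∘ fun e => (s, e, c.1, c.2)) a && p a)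
      = fun e => decide (e = k.2) && (decide (s = k.1) && p k.2) := by
    funext e
    by_cases he : e = k.2
    · by_cases hp : p k.2 = true
      · simp [pvKey, Prod.ext_iff, he, hp]
      · have hp' : p k.2 = false := Bool.eq_false_iff.mpr hp
        simp [pvKey, Prod.ext_iff, he, hp']
    · simp [pvKey, Prod.ext_iff, he]
  rw [hfun]
  by_cases hcond : s = k.1 ∧ p k.2 = true
  · rw [if_pos hcond]
    have hone : (fun e => decide (e = k.2) && (decide (s = k.1) && p k.2)) =
        fun e : Int => decide (e = k.2) := by
      funext e; simp [hcond.1, hcond.2]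
    rw [hone, List.filter_eq, List.map_replicate]
  · rw [if_neg hcond]
    have hzero : (decide (s = k.1) && p k.2) = false := by
      by_cases hs : s = k.1
      · have hp : p k.2 = false := Bool.eq_false_iff.mpr (fun hp => hcond ⟨hs, hp⟩)
        simp [hp]
      · simp [hs]
    rw [hzero]
    simp

-- count is invariant under the initial sort of B
lemma count_sorted (l : List Int) (e : Int) :
    (PySem.List.sorted l (fun x => x)).count e = l.count e :=
  (PySem.List.sorted_perm l (fun x => x) false).count_eq e

-- the pre-sort lists of A and B have identical fibers (per case, per start)
lemma fibers_case (starts ends : List Int) (min_len max_len : Int) (c : String × String) (k : Int × Int) :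
    pvFib k (starts.flatMap (fun s =>
        (ends.filter (fun e => decide (min_len ≤ e - s ∧ e - s ≤ max_len))).map (fun e => (s, e, c.1, c.2)))) =
    pvFib k (starts.flatMap (fun s =>
        ((PySem.List.sorted ends (fun x => x)).filter
            (fun e => decide (s + min_len ≤ e ∧ e ≤ s + max_len))).map (fun e => (s, e, c.1, c.2)))) := by
  unfold pvFib
  rw [List.filter_flatMap, List.filter_flatMap]
  congr 1
  funext s
  have hA := block_fiber ends s c (fun e => decide (min_len ≤ e - s ∧ e - s ≤ max_len)) k
  have hB := block_fiber (PySem.List.sorted ends (fun x => x)) s c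
      (fun e => decide (s + min_len ≤ e ∧ e ≤ s + max_len)) k
  unfold pvFib at hA hB
  rw [hA, hB, count_sorted]
  have : (s = k.1 ∧ decide (min_len ≤ k.2 - s ∧ k.2 - s ≤ max_len) = true) ↔
         (s = k.1 ∧ decide (s + min_len ≤ k.2 ∧ k.2 ≤ s + max_len) = true) := by
    simp; omega
  by_cases h : s = k.1 ∧ decide (min_len ≤ k.2 - s ∧ k.2 - s ≤ max_len) = true
  · rw [if_pos h, if_pos (this.mp h)]
  · rw [if_neg h, if_neg (fun hc => h (this.mpr hc))]

-- ---- loop-shape normal forms of the two ports ----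
lemma case_foldl (starts ends : List Int) (min_len max_len : Int) (c1 c2 : String)
    (init : List (Int × Int × String × String)) :
    starts.foldl (fun acc start =>
      ends.foldl (fun acc end_ =>
        let length := end_ - start
        if min_len ≤ length ∧ length ≤ max_len then acc ++ [(start, end_, c1, c2)] else acc) acc) init
    = init ++ starts.flatMap (fun s =>
        (ends.filter (fun e => decide (min_len ≤ e - s ∧ e - s ≤ max_len))).map (fun e => (s, e, c1, c2))) :=
  calc _ = starts.foldl (fun acc s => acc ++
        (ends.filter (fun e => decide (min_len ≤ e - s ∧ e - s ≤ max_len))).map (fun e => (s, e, c1, c2))) init :=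
      PySem.List.foldl_congr_mem _ _ _ _ (fun acc s _ =>
        PySem.List.foldl_append_ite (fun e => min_len ≤ e - s ∧ e - s ≤ max_len)
          (fun e => (s, e, c1, c2)) ends acc)
    _ = _ := PySem.List.foldl_append_eq_flatMap _ _ _

lemma case_foldl_alt (starts E : List Int) (hs : E.Pairwise (· ≤ ·)) (min_len max_len : Int)
    (c1 c2 : String) (init : List (Int × Int × String × String)) :
    starts.foldl (fun acc start =>
      let lo := pvBisectLeft E (start + min_len)
      let hi := pvBisectRight E (start + max_len)
      (PySem.List.slice E (some (lo : Int)) (some (hi : Int))).foldl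
        (fun acc end_ => acc ++ [(start, end_, c1, c2)]) acc) init
    = init ++ starts.flatMap (fun s =>
        (E.filter (fun e => decide (s + min_len ≤ e ∧ e ≤ s + max_len))).map (fun e => (s, e, c1, c2))) :=
  calc _ = starts.foldl (fun acc s => acc ++
        (E.filter (fun e => decide (s + min_len ≤ e ∧ e ≤ s + max_len))).map (fun e => (s, e, c1, c2))) init :=
      PySem.List.foldl_congr_mem _ _ _ _ (fun acc s _ => by
        show (PySem.List.slice E (some ((pvBisectLeft E (s + min_len) : Nat) : Int))
            (some ((pvBisectRight E (s + max_len) : Nat) : Int))).foldl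
            (fun acc end_ => acc ++ [(s, end_, c1, c2)]) acc = _
        rw [window_eq E hs (s + min_len) (s + max_len)]
        exact PySem.List.foldl_append_singleton_eq_map _ _ _)
    _ = _ := PySem.List.foldl_append_eq_flatMap _ _ _

lemma portA_eq (pfp pfm prp prm : List Int) (min_len max_len : Int) :
    find_amplicons pfp pfm prp prm min_len max_len =
      PySem.List.sorted2
        (pfp.flatMap (fun s =>
            (prm.filter (fun e => decide (min_len ≤ e - s ∧ e - s ≤ max_len))).map
              (fun e => (s, e, "forward_plus", "reverse_minus"))) ++
         prp.flatMap (fun s =>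
            (pfm.filter (fun e => decide (min_len ≤ e - s ∧ e - s ≤ max_len))).map
              (fun e => (s, e, "reverse_plus", "forward_minus"))))
        (fun x => x.1) (fun x => x.2.1) := by
  simp only [find_amplicons]
  congr 1
  rw [case_foldl, case_foldl]
  simp

lemma portB_eq (pfp pfm prp prm : List Int) (min_len max_len : Int) :
    find_amplicons_alt pfp pfm prp prm min_len max_len =
      PySem.List.sorted2
        (pfp.flatMap (fun s =>
            ((PySem.List.sorted prm (fun x => x)).filter
                (fun e => decide (s + min_len ≤ e ∧ e ≤ s + max_len))).map
              (fun e => (s, e, "forward_plus", "reverse_minus"))) ++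
         prp.flatMap (fun s =>
            ((PySem.List.sorted pfm (fun x => x)).filter
                (fun e => decide (s + min_len ≤ e ∧ e ≤ s + max_len))).map
              (fun e => (s, e, "reverse_plus", "forward_minus"))))
        (fun x => x.1) (fun x => x.2.1) := by
  simp only [find_amplicons_alt]
  congr 1
  rw [case_foldl_alt _ _ (PySem.List.sorted_pairwise prm (fun x => x)),
      case_foldl_alt _ _ (PySem.List.sorted_pairwise pfm (fun x => x))]
  simp

-- ===== VERDICT (by name: the statement is the Claim_ definition above) =====
theorem find_amplicons_spec : Claim_equal_find_amplicons := by
  intro pfp pfm prp prm min_len max_len _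
  unfold Spec_find_amplicons
  rw [portA_eq, portB_eq]
  apply sorted2_congr
  intro k
  unfold pvFib
  rw [List.filter_append, List.filter_append]
  have h1 := fibers_case pfp prm min_len max_len ("forward_plus", "reverse_minus") k
  have h2 := fibers_case prp pfm min_len max_len ("reverse_plus", "forward_minus") k
  unfold pvFib at h1 h2
  rw [h1, h2]
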